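-- pv_equiv track=rewrite | github.com/Andrew-Ysov/file_comparison | main.py | split_with_dif_ch
-- ===== SOURCE A (Python) =====
-- def split_with_dif_ch(s, leave_last = True):
--     prev = 1
--     sp = {'/', '\\'}
--
--     result = []
--
--     for i in range(len(s)):
--         if s[i] in sp:
--             result.append(s[prev-1:i])
--             prev = i+1
--     if len(s[prev:])>0:
--         result.append(s[prev-1:])
--
--     if leave_last == False:
--         return result[:-1]
--
--     return result
-- ===== SOURCE B (Python) =====
-- def split_with_dif_ch(s, leave_last=True):
--     # one char-accumulation pass: buffer grows until a separator; each later
--     # buffer starts with the separator that ended the previous segment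
--     result = []
--     buf = ''
--     for c in s:
--         if c == '/' or c == '\\':
--             result.append(buf)
--             buf = c
--         else:
--             buf += c
--     if len(buf) > 1:
--         result.append(buf)
--     return result if leave_last else result[:-1]
-- ===== Notes on version B (the rewrite author's own statement) =====
-- stated objective: alternative
-- what changed: A indexes the string with range(len(s)) and rebuilds each segment by slicing s[prev-1:i] from stored positions; B never indexes or slices: it makes one character-accumulation pass with a growing buffer that is flushed at each separator, the trailing buffer being kept iff it is longer than one character.
import Mathlib
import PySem

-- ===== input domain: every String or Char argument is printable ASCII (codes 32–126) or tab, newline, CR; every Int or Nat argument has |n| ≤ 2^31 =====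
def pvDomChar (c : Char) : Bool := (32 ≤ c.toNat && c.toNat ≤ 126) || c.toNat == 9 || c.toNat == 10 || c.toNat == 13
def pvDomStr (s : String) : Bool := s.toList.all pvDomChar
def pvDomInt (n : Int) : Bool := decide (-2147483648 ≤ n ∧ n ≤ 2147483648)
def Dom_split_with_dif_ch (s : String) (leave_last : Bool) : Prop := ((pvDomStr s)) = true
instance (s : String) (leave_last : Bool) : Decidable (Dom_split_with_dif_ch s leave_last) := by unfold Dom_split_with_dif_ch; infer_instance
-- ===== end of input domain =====

-- B replaces A's index/slice loop by a single character-accumulation pass (a growing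
-- buffer flushed at each separator) — objective: alternative decomposition, no index arithmetic.


-- ===== PORT A =====
def split_with_dif_ch (s : String) (leave_last : Bool) : List String :=
  let cs := s.toList
  let sp : PySem.Set Char := PySem.Set.ofList ['/', '\\']
  let st := (PySem.List.pyRange 0 (PySem.List.len cs) 1).foldl
    (fun (st : List String × Int) i =>
      if PySem.Set.contains sp (PySem.List.pyGetD cs i ' ') then
        (st.1 ++ [String.ofList (PySem.List.slice cs (some (st.2 - 1)) (some i))], i + 1)
      else st)
    ([], 1)
  let result :=
    if 0 < (PySem.List.slice cs (some st.2) none).length then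
      st.1 ++ [String.ofList (PySem.List.slice cs (some (st.2 - 1)) none)]
    else st.1
  if leave_last = false then result.dropLast
  else result

-- ===== PORT B =====
def split_with_dif_ch_alt (s : String) (leave_last : Bool) : List String :=
  let st := s.toList.foldl
    (fun (st : List String × List Char) c =>
      if c = '/' ∨ c = '\\' then (st.1 ++ [String.ofList st.2], [c])
      else (st.1, st.2 ++ [c]))
    ([], [])
  let result := if 1 < st.2.length then st.1 ++ [String.ofList st.2] else st.1
  if leave_last then result else result.dropLast

-- ===== PRECONDITION & SPEC =====
def Spec_split_with_dif_ch (s : String) (leave_last : Bool) (out : List String) : Prop := out = split_with_dif_ch_alt s leave_last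
instance (s : String) (leave_last : Bool) (out : List String) : Decidable (Spec_split_with_dif_ch s leave_last out) := by unfold Spec_split_with_dif_ch; infer_instance

-- ===== CLAIM (what is proved, stated in full; the proofs are below) =====
def Claim_equal_split_with_dif_ch : Prop := ∀ (s : String) (leave_last : Bool), Dom_split_with_dif_ch s leave_last → Spec_split_with_dif_ch s leave_last (split_with_dif_ch s leave_last)

-- ===== LEMMAS AND PROOFS =====

-- Loop invariant: after both loops have consumed the prefix `pre`, A's state is
-- (res, prev) with 1 ≤ prev ≤ pre.length + 1 and B's buffer is exactly the tail
-- of `pre` from position prev - 1; the accumulated result lists coincide.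
theorem pv_loop (rest : List Char) : ∀ (pre : List Char) (res : List String) (prev : Int),
    1 ≤ prev → prev - 1 ≤ (pre.length : Int) →
    (let stA := (PySem.List.pyRange pre.length (pre.length + rest.length) 1).foldl
      (fun (st : List String × Int) i =>
        if PySem.Set.contains (PySem.Set.ofList ['/', '\\']) (PySem.List.pyGetD (pre ++ rest) i ' ') then
          (st.1 ++ [String.ofList (PySem.List.slice (pre ++ rest) (some (st.2 - 1)) (some i))], i + 1)
        else st) (res, prev)
     let stB := rest.foldl
      (fun (st : List String × List Char) c =>
        if c = '/' ∨ c = '\\' then (st.1 ++ [String.ofList st.2], [c])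
        else (st.1, st.2 ++ [c])) (res, pre.drop (prev - 1).toNat)
     stA.1 = stB.1 ∧ stB.2 = (pre ++ rest).drop (stA.2 - 1).toNat ∧
       1 ≤ stA.2 ∧ stA.2 - 1 ≤ ((pre ++ rest).length : Int)) := by
  induction rest with
  | nil =>
    intro pre res prev h1 h2
    rw [PySem.List.pyRange_one_eq_nil (by simp)]
    exact ⟨rfl, by simp, h1, by simpa using h2⟩
  | cons c rest ih =>
    intro pre res prev h1 h2
    have hk : (prev - 1).toNat ≤ pre.length := by omega
    rw [PySem.List.pyRange_one_cons (by push_cast [List.length_cons]; omega)]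
    simp only [List.foldl_cons]
    have hget : PySem.List.pyGetD (pre ++ c :: rest) (pre.length : Int) ' ' = c := by
      simp [PySem.List.pyGetD_natCast]
    rw [hget]
    have hassoc : pre ++ c :: rest = (pre ++ [c]) ++ rest := by simp
    have hlen : ((pre ++ [c]).length : Int) = (pre.length : Int) + 1 := by simp
    have hb : (pre.length : Int) + ((c :: rest).length : Int)
        = (pre.length : Int) + 1 + (rest.length : Int) := by push_cast [List.length_cons]; ring
    by_cases hc : c = '/' ∨ c = '\\'
    · have hcB : PySem.Set.contains (PySem.Set.ofList ['/', '\\']) c = true := by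
        rcases hc with h | h <;> simp [h]
      rw [if_pos hcB, if_pos hc]
      have hslice : PySem.List.slice (pre ++ c :: rest) (some (prev - 1)) (some (pre.length : Int))
          = pre.drop (prev - 1).toNat := by
        rw [PySem.List.slice_toNat _ (by omega) (by positivity)]
        rw [List.drop_append_of_le_length hk]
        rw [List.take_append_of_le_length (by simp)]
        simp
      rw [hslice, hassoc, hb]
      have := ih (pre ++ [c]) (res ++ [String.ofList (pre.drop (prev - 1).toNat)]) ((pre.length : Int) + 1)
        (by omega) (by rw [hlen]; omega)
      have hdrop : (pre ++ [c]).drop (((pre.length : Int) + 1) - 1).toNat = [c] := by simp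
      rw [hlen, hdrop] at this
      exact this
    · have hcB : ¬ (PySem.Set.contains (PySem.Set.ofList ['/', '\\']) c = true) := by
        simp only [PySem.Set.contains_eq_listContains]
        simpa using hc
      rw [if_neg hcB, if_neg hc, hassoc, hb]
      have := ih (pre ++ [c]) res prev h1 (by rw [hlen]; omega)
      have hdrop : (pre ++ [c]).drop (prev - 1).toNat = pre.drop (prev - 1).toNat ++ [c] := by
        rw [List.drop_append_of_le_length hk]
      rw [hlen, hdrop] at this
      exact this

-- ===== VERDICT (by name: the statement is the Claim_ definition above) =====
theorem split_with_dif_ch_spec : Claim_equal_split_with_dif_ch := by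
  intro s leave_last _
  unfold Spec_split_with_dif_ch split_with_dif_ch split_with_dif_ch_alt
  obtain ⟨h1, h2, h3, h4⟩ := pv_loop s.toList [] [] 1 le_rfl (by simp)
  simp only [List.length_nil, Nat.cast_zero, zero_add, List.nil_append, List.drop_nil] at h1 h2 h3 h4
  simp only [PySem.List.len_eq]
  set a := (PySem.List.pyRange 0 (s.toList.length : Int) 1).foldl
    (fun (st : List String × Int) i =>
      if PySem.Set.contains (PySem.Set.ofList ['/', '\\']) (PySem.List.pyGetD s.toList i ' ') then
        (st.1 ++ [String.ofList (PySem.List.slice s.toList (some (st.2 - 1)) (some i))], i + 1)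
      else st)
    ([], 1) with ha
  set b := s.toList.foldl
    (fun (st : List String × List Char) c =>
      if c = '/' ∨ c = '\\' then (st.1 ++ [String.ofList st.2], [c])
      else (st.1, st.2 ++ [c]))
    ([], []) with hb
  have hR : (if 0 < (PySem.List.slice s.toList (some a.2) none).length then
        a.1 ++ [String.ofList (PySem.List.slice s.toList (some (a.2 - 1)) none)]
      else a.1)
      = (if 1 < b.2.length then b.1 ++ [String.ofList b.2] else b.1) := by
    rw [PySem.List.slice_from _ (by omega), PySem.List.slice_from _ (by omega)]
    rw [← h2, ← h1]
    have hlb : b.2.length = s.toList.length - (a.2 - 1).toNat := by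
      rw [h2, List.length_drop]
    have : (0 < (s.toList.drop a.2.toNat).length) ↔ (1 < b.2.length) := by
      rw [List.length_drop, hlb]; omega
    simp only [this]
  rw [hR]
  cases leave_last <;> simp
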